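-- pv_equiv track=rewrite | github.com/yganalyst/daily-algorithm | codility/6_Triangle.py | solution
-- ===== SOURCE A (Python) =====
-- def solution(A):
--     if len(A)<3:
--         return 0
--     A = sorted(A)
--     for i in range(len(A)-2):
--         if A[i]+A[i+1] > A[i+2]:
--             return 1
--     return 0
-- ===== SOURCE B (Python) =====
-- def solution(A):
--     n = len(A)
--     if n < 3:
--         return 0
--     for i in range(n):
--         for j in range(i + 1, n):
--             for k in range(j + 1, n):
--                 if A[i] + A[j] > A[k] and A[i] + A[k] > A[j] and A[j] + A[k] > A[i]:
--                     return 1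
--     return 0
-- ===== Notes on version B (the rewrite author's own statement) =====
-- stated objective: alternative
-- what changed: Replaces sort-then-scan-adjacent-triples with a direct brute-force check of the full triangle inequality over all index triples i<j<k of the unsorted list.
import Mathlib
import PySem

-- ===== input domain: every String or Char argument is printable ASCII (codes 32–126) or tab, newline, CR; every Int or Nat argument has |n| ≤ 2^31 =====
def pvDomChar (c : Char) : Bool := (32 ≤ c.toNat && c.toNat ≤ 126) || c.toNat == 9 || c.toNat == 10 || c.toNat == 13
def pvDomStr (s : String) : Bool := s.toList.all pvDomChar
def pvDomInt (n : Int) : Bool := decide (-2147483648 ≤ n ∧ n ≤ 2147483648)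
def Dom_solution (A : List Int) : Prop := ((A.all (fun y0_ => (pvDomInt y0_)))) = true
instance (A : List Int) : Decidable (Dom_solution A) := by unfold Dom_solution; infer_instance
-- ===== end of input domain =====

-- B replaces A's sort-then-adjacent-triple scan by a brute-force check of the full
-- triangle inequality over all index triples i<j<k of the unsorted list (alternative, not faster).


-- ===== PORT A =====
-- the 'if A[i]+A[i+1] > A[i+2]' test of A's loop body (indices are always in range, default 0)
def pvCondA (s : List Int) (i : Int) : Bool :=
  decide (PySem.List.pyGetD s i 0 + PySem.List.pyGetD s (i + 1) 0 > PySem.List.pyGetD s (i + 2) 0)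

-- 'for i in range(len(A)-2): if …: return 1' / 'return 0'
def pvLoopA (s : List Int) : List Int → Int
  | [] => 0
  | i :: rest => if pvCondA s i then 1 else pvLoopA s rest

def solution (A : List Int) : Int :=
  if (A.length : Int) < 3 then 0
  else
    let s := PySem.List.sorted A (fun x => x) false
    pvLoopA s (PySem.List.pyRange 0 ((s.length : Int) - 2) 1)

-- ===== PORT B =====
-- innermost 'for k in range(j+1, n): if A[i]+A[j]>A[k] and A[i]+A[k]>A[j] and A[j]+A[k]>A[i]: return 1'
def pvLoopK (A : List Int) (ai aj : Int) : List Int → Bool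
  | [] => false
  | k :: ks =>
    if ai + aj > PySem.List.pyGetD A k 0 ∧ ai + PySem.List.pyGetD A k 0 > aj ∧
        aj + PySem.List.pyGetD A k 0 > ai then true
    else pvLoopK A ai aj ks

-- 'for j in range(i+1, n): …'
def pvLoopJ (A : List Int) (n ai : Int) : List Int → Bool
  | [] => false
  | j :: js =>
    if pvLoopK A ai (PySem.List.pyGetD A j 0) (PySem.List.pyRange (j + 1) n 1) then true
    else pvLoopJ A n ai js

-- 'for i in range(n): …'
def pvLoopI (A : List Int) (n : Int) : List Int → Bool
  | [] => false
  | i :: is' =>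
    if pvLoopJ A n (PySem.List.pyGetD A i 0) (PySem.List.pyRange (i + 1) n 1) then true
    else pvLoopI A n is'

def solution_alt (A : List Int) : Int :=
  let n := (A.length : Int)
  if n < 3 then 0
  else if pvLoopI A n (PySem.List.pyRange 0 n 1) then 1 else 0

-- ===== PRECONDITION & SPEC =====
def Spec_solution (A : List Int) (out : Int) : Prop := out = solution_alt A
instance (A : List Int) (out : Int) : Decidable (Spec_solution A out) := by unfold Spec_solution; infer_instance

-- ===== CLAIM (what is proved, stated in full; the proofs are below) =====
def Claim_equal_solution : Prop := ∀ (A : List Int), Dom_solution A → Spec_solution A (solution A)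

-- ===== LEMMAS AND PROOFS =====

-- A's success condition: some adjacent triple of the sorted list works
def CondA (s : List Int) : Prop := ∃ i : Nat, i + 2 < s.length ∧ s[i]! + s[i + 1]! > s[i + 2]!

-- B's success condition: some index triple i<j<k satisfies the full triangle inequality
def CondB (l : List Int) : Prop :=
  ∃ i j k : Nat, i < j ∧ j < k ∧ k < l.length ∧
    l[i]! + l[j]! > l[k]! ∧ l[i]! + l[k]! > l[j]! ∧ l[j]! + l[k]! > l[i]!

-- permutation-invariant phrasing of "the three elements of t form a triangle"
def TriOK (t : List Int) : Prop := ∀ x ∈ t, t.sum - x > x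

def TriSubP (l : List Int) : Prop := ∃ t : List Int, t.length = 3 ∧ TriOK t ∧ List.Subperm t l

theorem triOK_iff (a b c : Int) :
    TriOK [a, b, c] ↔ (a + b > c ∧ a + c > b ∧ b + c > a) := by
  constructor
  · intro h
    have ha := h a (by simp)
    have hb := h b (by simp)
    have hc := h c (by simp)
    simp at ha hb hc
    omega
  · rintro ⟨h1, h2, h3⟩ x hx
    simp at hx
    rcases hx with rfl | rfl | rfl <;> simp <;> omega

theorem triOK_perm {t t' : List Int} (p : List.Perm t t') (h : TriOK t) : TriOK t' := by
  intro x hx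
  rw [← p.sum_eq]
  exact h x (p.mem_iff.mpr hx)

theorem triSubP_perm {l l' : List Int} (p : List.Perm l l') (h : TriSubP l) : TriSubP l' := by
  obtain ⟨t, h3, hok, hsp⟩ := h
  exact ⟨t, h3, hok, (p.subperm_left).mp hsp⟩

theorem getElem!_mem {l : List Int} {i : Nat} (h : i < l.length) : l[i]! ∈ l := by
  rw [getElem!_pos l i h]; exact List.getElem_mem h

theorem bang_cons_zero (x : Int) (xs : List Int) : (x :: xs)[0]! = x := by
  rw [getElem!_pos (x :: xs) 0 (by simp)]; simp

theorem bang_cons_succ (x : Int) (xs : List Int) (n : Nat) (h : n < xs.length) :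
    (x :: xs)[n + 1]! = xs[n]! := by
  rw [getElem!_pos (x :: xs) (n + 1) (by simpa using Nat.succ_lt_succ h), getElem!_pos xs n h]
  simp

theorem pair_sublist : ∀ (l : List Int) (i j : Nat), i < j → j < l.length →
    List.Sublist [l[i]!, l[j]!] l := by
  intro l
  induction l with
  | nil => intro i j _ h; simp at h
  | cons x xs ih =>
    intro i j hij hj
    obtain ⟨j', rfl⟩ : ∃ j', j = j' + 1 := ⟨j - 1, by omega⟩
    have hj' : j' < xs.length := by simpa using hj
    cases i with
    | zero =>
      rw [bang_cons_zero, bang_cons_succ x xs j' hj']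
      exact (List.singleton_sublist.mpr (getElem!_mem hj')).cons₂ x
    | succ i' =>
      rw [bang_cons_succ x xs i' (by omega), bang_cons_succ x xs j' hj']
      exact (ih i' j' (by omega) hj').cons x

theorem triple_sublist : ∀ (l : List Int) (i j k : Nat), i < j → j < k → k < l.length →
    List.Sublist [l[i]!, l[j]!, l[k]!] l := by
  intro l
  induction l with
  | nil => intro i j k _ _ h; simp at h
  | cons x xs ih =>
    intro i j k hij hjk hk
    obtain ⟨j', rfl⟩ : ∃ j', j = j' + 1 := ⟨j - 1, by omega⟩
    obtain ⟨k', rfl⟩ : ∃ k', k = k' + 1 := ⟨k - 1, by omega⟩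
    have hk' : k' < xs.length := by simpa using hk
    cases i with
    | zero =>
      rw [bang_cons_zero, bang_cons_succ x xs j' (by omega), bang_cons_succ x xs k' hk']
      exact (pair_sublist xs j' k' (by omega) hk').cons₂ x
    | succ i' =>
      rw [bang_cons_succ x xs i' (by omega), bang_cons_succ x xs j' (by omega),
        bang_cons_succ x xs k' hk']
      exact (ih i' j' k' (by omega) (by omega) hk').cons x

theorem sublist_pair_idx : ∀ (l : List Int) (a b : Int), List.Sublist [a, b] l →
    ∃ i j : Nat, i < j ∧ j < l.length ∧ l[i]! = a ∧ l[j]! = b := by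
  intro l
  induction l with
  | nil => intro a b h; exact absurd (List.eq_nil_of_sublist_nil h) (by simp)
  | cons x xs ih =>
    intro a b h
    cases h with
    | cons _ h' =>
      obtain ⟨i, j, hij, hj, ha, hb⟩ := ih a b h'
      refine ⟨i + 1, j + 1, by omega, by simpa using hj, ?_, ?_⟩
      · rw [bang_cons_succ x xs i (by omega)]; exact ha
      · rw [bang_cons_succ x xs j hj]; exact hb
    | cons₂ _ h' =>
      obtain ⟨j, hj, hb⟩ := List.mem_iff_getElem.mp (List.singleton_sublist.mp h')
      refine ⟨0, j + 1, by omega, by simpa using hj, bang_cons_zero x xs, ?_⟩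
      rw [bang_cons_succ x xs j hj, getElem!_pos xs j hj]; exact hb

theorem sublist_triple_idx : ∀ (l : List Int) (a b c : Int), List.Sublist [a, b, c] l →
    ∃ i j k : Nat, i < j ∧ j < k ∧ k < l.length ∧ l[i]! = a ∧ l[j]! = b ∧ l[k]! = c := by
  intro l
  induction l with
  | nil => intro a b c h; exact absurd (List.eq_nil_of_sublist_nil h) (by simp)
  | cons x xs ih =>
    intro a b c h
    cases h with
    | cons _ h' =>
      obtain ⟨i, j, k, hij, hjk, hk, ha, hb, hc⟩ := ih a b c h'
      refine ⟨i + 1, j + 1, k + 1, by omega, by omega, by simpa using hk, ?_, ?_, ?_⟩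
      · rw [bang_cons_succ x xs i (by omega)]; exact ha
      · rw [bang_cons_succ x xs j (by omega)]; exact hb
      · rw [bang_cons_succ x xs k hk]; exact hc
    | cons₂ _ h' =>
      obtain ⟨j, k, hjk, hk, hb, hc⟩ := sublist_pair_idx xs b c h'
      refine ⟨0, j + 1, k + 1, by omega, by omega, by simpa using hk, bang_cons_zero x xs, ?_, ?_⟩
      · rw [bang_cons_succ x xs j (by omega)]; exact hb
      · rw [bang_cons_succ x xs k hk]; exact hc

theorem pairwise_le_getElem! {l : List Int} (h : l.Pairwise (· ≤ ·)) (i j : Nat)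
    (hij : i ≤ j) (hj : j < l.length) : l[i]! ≤ l[j]! := by
  rcases Nat.eq_or_lt_of_le hij with rfl | hlt
  · exact le_refl _
  · have := List.pairwise_iff_getElem.mp h i j (by omega) hj hlt
    rw [getElem!_pos l i (by omega), getElem!_pos l j hj]
    exact this

theorem sort3 (x y z : Int) :
    ∃ a b c : Int, a ≤ b ∧ b ≤ c ∧ List.Perm [a, b, c] [x, y, z] := by
  have swap2 : List.Perm [y, x, z] [x, y, z] := List.Perm.swap x y [z]
  have swap23 : List.Perm [x, z, y] [x, y, z] := List.Perm.cons x (List.Perm.swap y z [])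
  have rot : List.Perm [z, x, y] [x, y, z] := (List.Perm.swap x z [y]).trans swap23
  have rot2 : List.Perm [y, z, x] [x, y, z] := (List.Perm.cons y (List.Perm.swap x z [])).trans swap2
  have rev : List.Perm [z, y, x] [x, y, z] := (List.Perm.swap y z [x]).trans rot2
  rcases le_total x y with h1 | h1 <;> rcases le_total y z with h2 | h2 <;>
    rcases le_total x z with h3 | h3
  · exact ⟨x, y, z, h1, h2, List.Perm.refl _⟩
  · exact ⟨x, y, z, h1, h2, List.Perm.refl _⟩
  · exact ⟨x, z, y, h3, h2, swap23⟩
  · exact ⟨z, x, y, h3, h1, rot⟩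
  · exact ⟨y, x, z, h1, h3, swap2⟩
  · exact ⟨y, z, x, h2, h3, rot2⟩
  · exact ⟨z, y, x, h2, h1, rev⟩
  · exact ⟨z, y, x, h2, h1, rev⟩

theorem condB_of_condA {s : List Int} (hs : s.Pairwise (· ≤ ·)) (h : CondA s) : CondB s := by
  obtain ⟨i, hi, hsum⟩ := h
  have h01 : s[i]! ≤ s[i + 1]! := pairwise_le_getElem! hs i (i + 1) (by omega) (by omega)
  have h12 : s[i + 1]! ≤ s[i + 2]! := pairwise_le_getElem! hs (i + 1) (i + 2) (by omega) hi
  exact ⟨i, i + 1, i + 2, by omega, by omega, hi, hsum, by omega, by omega⟩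

theorem triSubP_of_condB {l : List Int} (h : CondB l) : TriSubP l := by
  obtain ⟨i, j, k, hij, hjk, hk, h1, h2, h3⟩ := h
  refine ⟨[l[i]!, l[j]!, l[k]!], rfl, (triOK_iff _ _ _).mpr ⟨h1, h2, h3⟩,
    (triple_sublist l i j k hij hjk hk).subperm⟩

theorem condB_of_triSubP {l : List Int} (h : TriSubP l) : CondB l := by
  obtain ⟨t, h3, hok, hsp⟩ := h
  obtain ⟨u, hu, hsub⟩ := hsp
  have hlen : u.length = 3 := by rw [hu.length_eq, h3]
  obtain ⟨x, y, z, rfl⟩ := List.length_eq_three.mp hlen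
  have hok' : TriOK [x, y, z] := triOK_perm hu.symm hok
  obtain ⟨i, j, k, hij, hjk, hk, ha, hb, hc⟩ := sublist_triple_idx l x y z hsub
  obtain ⟨t1, t2, t3⟩ := (triOK_iff x y z).mp hok'
  exact ⟨i, j, k, hij, hjk, hk, by rw [ha, hb, hc]; exact t1, by rw [ha, hc, hb]; exact t2,
    by rw [hb, hc, ha]; exact t3⟩

theorem condA_of_triSubP {s : List Int} (hs : s.Pairwise (· ≤ ·)) (h : TriSubP s) : CondA s := by
  obtain ⟨t, h3, hok, hsp⟩ := h
  obtain ⟨x, y, z, rfl⟩ := List.length_eq_three.mp h3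
  obtain ⟨a, b, c, hab, hbc, hperm⟩ := sort3 x y z
  have hok' : TriOK [a, b, c] := triOK_perm hperm.symm hok
  have hsp' : List.Subperm [a, b, c] s := hperm.subperm.trans hsp
  have hpw : List.Pairwise (· ≤ ·) [a, b, c] := by
    simp [List.pairwise_cons]; exact ⟨⟨hab, le_trans hab hbc⟩, hbc⟩
  have hsub : List.Sublist [a, b, c] s := List.sublist_of_subperm_of_pairwise hsp' hpw hs
  obtain ⟨p, q, r, hpq, hqr, hr, ha, hb, hc⟩ := sublist_triple_idx s a b c hsub
  obtain ⟨t1, _, _⟩ := (triOK_iff a b c).mp hok'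
  refine ⟨r - 2, by omega, ?_⟩
  have e1 : r - 2 + 1 = r - 1 := by omega
  have e2 : r - 2 + 2 = r := by omega
  rw [e1, e2]
  have hp2 : s[p]! ≤ s[r - 2]! := pairwise_le_getElem! hs p (r - 2) (by omega) (by omega)
  have hq1 : s[q]! ≤ s[r - 1]! := pairwise_le_getElem! hs q (r - 1) (by omega) (by omega)
  rw [← hc] at t1
  omega

-- the two success conditions agree
theorem condA_iff_condB (A : List Int) :
    CondA (PySem.List.sorted A (fun x => x) false) ↔ CondB A := by
  have hperm : List.Perm (PySem.List.sorted A (fun x => x) false) A := PySem.List.sorted_perm A _ _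
  have hpw : (PySem.List.sorted A (fun x => x) false).Pairwise (· ≤ ·) :=
    PySem.List.sorted_pairwise A (fun x => x)
  constructor
  · intro h
    exact condB_of_triSubP (triSubP_perm hperm (triSubP_of_condB (condB_of_condA hpw h)))
  · intro h
    exact condA_of_triSubP hpw (triSubP_perm hperm.symm (triSubP_of_condB h))

-- ===== loop characterizations =====

theorem pvLoopA_eq_one_iff (s : List Int) (L : List Int) :
    pvLoopA s L = 1 ↔ ∃ i ∈ L, pvCondA s i = true := by
  induction L with
  | nil => simp [pvLoopA]
  | cons x xs ih =>
    by_cases h : pvCondA s x = true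
    · simp [pvLoopA, h]
    · simp [pvLoopA, h, ih]

theorem pvLoopA_zero_or_one (s : List Int) (L : List Int) :
    pvLoopA s L = 0 ∨ pvLoopA s L = 1 := by
  induction L with
  | nil => simp [pvLoopA]
  | cons x xs ih =>
    by_cases h : pvCondA s x = true
    · simp [pvLoopA, h]
    · simpa [pvLoopA, h] using ih

theorem pvLoopK_iff (A : List Int) (ai aj : Int) (L : List Int) :
    pvLoopK A ai aj L = true ↔ ∃ k ∈ L,
      ai + aj > PySem.List.pyGetD A k 0 ∧ ai + PySem.List.pyGetD A k 0 > aj ∧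
        aj + PySem.List.pyGetD A k 0 > ai := by
  induction L with
  | nil => simp [pvLoopK]
  | cons x xs ih =>
    by_cases h : ai + aj > PySem.List.pyGetD A x 0 ∧ ai + PySem.List.pyGetD A x 0 > aj ∧
        aj + PySem.List.pyGetD A x 0 > ai
    · simp [pvLoopK, h]
    · simp [pvLoopK, h, ih]

theorem pvLoopJ_iff (A : List Int) (n ai : Int) (L : List Int) :
    pvLoopJ A n ai L = true ↔ ∃ j ∈ L,
      pvLoopK A ai (PySem.List.pyGetD A j 0) (PySem.List.pyRange (j + 1) n 1) = true := by
  induction L with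
  | nil => simp [pvLoopJ]
  | cons x xs ih =>
    by_cases h : pvLoopK A ai (PySem.List.pyGetD A x 0) (PySem.List.pyRange (x + 1) n 1) = true
    · simp [pvLoopJ, h]
    · simp [pvLoopJ, h, ih]

theorem pvLoopI_iff (A : List Int) (n : Int) (L : List Int) :
    pvLoopI A n L = true ↔ ∃ i ∈ L,
      pvLoopJ A n (PySem.List.pyGetD A i 0) (PySem.List.pyRange (i + 1) n 1) = true := by
  induction L with
  | nil => simp [pvLoopI]
  | cons x xs ih =>
    by_cases h : pvLoopJ A n (PySem.List.pyGetD A x 0) (PySem.List.pyRange (x + 1) n 1) = true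
    · simp [pvLoopI, h]
    · simp [pvLoopI, h, ih]

theorem pyGetD_bang {l : List Int} {i : Int} (h0 : 0 ≤ i) (h : i < (l.length : Int)) :
    PySem.List.pyGetD l i 0 = l[i.toNat]! := by
  rw [PySem.List.pyGetD_eq_getElem l 0 h0 h, getElem!_pos l i.toNat (by omega)]

theorem pvLoopI_iff_condB (A : List Int) :
    pvLoopI A (A.length : Int) (PySem.List.pyRange 0 (A.length : Int) 1) = true ↔ CondB A := by
  rw [pvLoopI_iff]
  constructor
  · rintro ⟨i, hi, hJ⟩
    rw [PySem.List.mem_pyRange_one] at hi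
    rw [pvLoopJ_iff] at hJ
    obtain ⟨j, hj, hK⟩ := hJ
    rw [PySem.List.mem_pyRange_one] at hj
    rw [pvLoopK_iff] at hK
    obtain ⟨k, hk, h1, h2, h3⟩ := hK
    rw [PySem.List.mem_pyRange_one] at hk
    rw [pyGetD_bang (by omega) (by omega), pyGetD_bang (by omega) (by omega),
        pyGetD_bang (by omega) (by omega)] at h1 h2 h3
    exact ⟨i.toNat, j.toNat, k.toNat, by omega, by omega, by omega, h1, h2, h3⟩
  · rintro ⟨i, j, k, hij, hjk, hk, h1, h2, h3⟩
    refine ⟨(i : Int), by rw [PySem.List.mem_pyRange_one]; omega, ?_⟩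
    rw [pvLoopJ_iff]
    refine ⟨(j : Int), by rw [PySem.List.mem_pyRange_one]; omega, ?_⟩
    rw [pvLoopK_iff]
    refine ⟨(k : Int), by rw [PySem.List.mem_pyRange_one]; omega, ?_⟩
    rw [pyGetD_bang (by omega) (by omega), pyGetD_bang (by omega) (by omega),
        pyGetD_bang (by omega) (by omega)]
    simp only [Int.toNat_natCast]
    exact ⟨h1, h2, h3⟩

theorem pvLoopA_iff_condA (s : List Int) :
    pvLoopA s (PySem.List.pyRange 0 ((s.length : Int) - 2) 1) = 1 ↔ CondA s := by
  rw [pvLoopA_eq_one_iff]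
  constructor
  · rintro ⟨i, hi, hc⟩
    rw [PySem.List.mem_pyRange_one] at hi
    unfold pvCondA at hc
    rw [decide_eq_true_iff] at hc
    rw [pyGetD_bang (by omega) (by omega), pyGetD_bang (by omega) (by omega),
        pyGetD_bang (by omega) (by omega)] at hc
    have e1 : (i + 1).toNat = i.toNat + 1 := by omega
    have e2 : (i + 2).toNat = i.toNat + 2 := by omega
    rw [e1, e2] at hc
    exact ⟨i.toNat, by omega, hc⟩
  · rintro ⟨i, hi, hc⟩
    refine ⟨(i : Int), by rw [PySem.List.mem_pyRange_one]; omega, ?_⟩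
    unfold pvCondA
    rw [decide_eq_true_iff]
    rw [pyGetD_bang (by omega) (by omega), pyGetD_bang (by omega) (by omega),
        pyGetD_bang (by omega) (by omega)]
    have e1 : ((i : Int) + 1).toNat = i + 1 := by omega
    have e2 : ((i : Int) + 2).toNat = i + 2 := by omega
    rw [e1, e2]
    simpa using hc

-- ===== VERDICT (by name: the statement is the Claim_ definition above) =====
theorem solution_spec : Claim_equal_solution := by
  intro A _
  unfold Spec_solution solution solution_alt
  by_cases hlen : (A.length : Int) < 3
  · simp [hlen]
  · simp only [hlen, if_false]
    have hiff : pvLoopA (PySem.List.sorted A (fun x => x) false)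
        (PySem.List.pyRange 0 (((PySem.List.sorted A (fun x => x) false).length : Int) - 2) 1) = 1 ↔
        pvLoopI A (A.length : Int) (PySem.List.pyRange 0 (A.length : Int) 1) = true := by
      rw [pvLoopA_iff_condA, pvLoopI_iff_condB, condA_iff_condB]
    by_cases hB : pvLoopI A (A.length : Int) (PySem.List.pyRange 0 (A.length : Int) 1) = true
    · simp only [hB, if_true]
      exact hiff.mpr hB
    · rw [if_neg hB]
      rcases pvLoopA_zero_or_one (PySem.List.sorted A (fun x => x) false)
          (PySem.List.pyRange 0 (((PySem.List.sorted A (fun x => x) false).length : Int) - 2) 1) with h0 | h1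
      · exact h0
      · exact absurd (hiff.mp h1) hB
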